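-- pv_equiv track=rewrite | github.com/arod40/compbio-hic-cnn | app/utils.py | get_positive_pairs_from_list_of_bio_replicates
-- ===== SOURCE A (Python) =====
-- from collections import defaultdict
-- from itertools import combinations, product
--
-- def create_bio_replicate_to_experiment_dict(
--     experiment_to_cell_type,
--     experiment_to_bio_replicate,
--     cell_type,
--     use_experiments=None,
-- ):
--     bio_replicate_to_experiment = defaultdict(list)
--     for exp in experiment_to_cell_type:
--         if use_experiments is not None and exp not in use_experiments:
--             continue
--
--         if experiment_to_cell_type[exp] == cell_type:
--             bio_replicate_to_experiment[experiment_to_bio_replicate[exp]].append(exp)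
--     return bio_replicate_to_experiment
--
-- def get_positive_pairs_from_list_of_bio_replicates(
--     experiment_to_cell_type,
--     experiment_to_bio_replicate,
--     cell_types,
--     bio_replicates,
--     use_experiments=None,
-- ):
--     positive_pairs = []
--     for cell_type in cell_types:
--         bio_replicate_to_experiment = create_bio_replicate_to_experiment_dict(
--             experiment_to_cell_type,
--             experiment_to_bio_replicate,
--             cell_type,
--             use_experiments=use_experiments,
--         )
--
--         for bio_replicate in bio_replicates:
--             for exp1, exp2 in combinations(
--                 bio_replicate_to_experiment[bio_replicate], 2
--             ):
--                 positive_pairs.append((exp1, exp2))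
--
--     return positive_pairs
-- ===== SOURCE B (Python) =====
-- from collections import defaultdict
-- from itertools import combinations
--
--
-- def get_positive_pairs_from_list_of_bio_replicates(
--     experiment_to_cell_type,
--     experiment_to_bio_replicate,
--     cell_types,
--     bio_replicates,
--     use_experiments=None,
-- ):
--     wanted = set(cell_types)
--     allowed = None if use_experiments is None else set(use_experiments)
--     index = defaultdict(list)
--     for exp, cell_type in experiment_to_cell_type.items():
--         if cell_type in wanted and (allowed is None or exp in allowed):
--             index[(cell_type, experiment_to_bio_replicate[exp])].append(exp)
--     return [
--         pair
--         for cell_type in cell_types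
--         for bio_replicate in bio_replicates
--         for pair in combinations(index.get((cell_type, bio_replicate), []), 2)
--     ]
-- ===== Notes on version B (the rewrite author's own statement) =====
-- stated objective: faster
-- what changed: B replaces A's per-cell-type rebuild of a bio_replicate->experiments dict (one full scan of the experiments per requested cell type) with a single pass over the experiments that indexes them by the (cell_type, bio_replicate) pair, then each requested (cell_type, bio_replicate) key is answered by one dict lookup.
import Mathlib
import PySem

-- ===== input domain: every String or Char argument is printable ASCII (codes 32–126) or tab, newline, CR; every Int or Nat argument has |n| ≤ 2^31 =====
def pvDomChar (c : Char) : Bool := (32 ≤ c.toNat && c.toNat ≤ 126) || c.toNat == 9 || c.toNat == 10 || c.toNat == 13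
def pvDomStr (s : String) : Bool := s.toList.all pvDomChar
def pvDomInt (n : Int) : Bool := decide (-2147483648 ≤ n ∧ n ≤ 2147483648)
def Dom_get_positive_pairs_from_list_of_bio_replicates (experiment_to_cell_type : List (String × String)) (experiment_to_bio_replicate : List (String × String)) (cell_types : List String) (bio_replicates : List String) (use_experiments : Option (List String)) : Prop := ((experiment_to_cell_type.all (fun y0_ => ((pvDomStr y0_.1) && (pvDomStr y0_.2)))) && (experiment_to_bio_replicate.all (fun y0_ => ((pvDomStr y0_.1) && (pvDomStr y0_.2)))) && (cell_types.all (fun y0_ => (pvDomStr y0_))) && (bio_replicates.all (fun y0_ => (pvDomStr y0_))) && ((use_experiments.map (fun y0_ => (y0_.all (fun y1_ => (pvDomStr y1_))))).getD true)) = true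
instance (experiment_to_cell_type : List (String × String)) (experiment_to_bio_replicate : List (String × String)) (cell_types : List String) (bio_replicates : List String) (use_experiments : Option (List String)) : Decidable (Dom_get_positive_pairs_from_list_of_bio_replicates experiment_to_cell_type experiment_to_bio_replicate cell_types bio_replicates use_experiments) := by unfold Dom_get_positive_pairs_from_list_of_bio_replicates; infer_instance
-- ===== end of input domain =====

-- B: one pass indexing experiments by (cell_type, bio_replicate) instead of rebuilding a
-- per-cell-type dict for every requested cell type (objective: faster).
-- ===== PORT A =====
-- itertools.combinations(xs, 2)
-- itertools.combinations(xs, 2)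
def pyCombinations2 : List String → List (String × String)
  | [] => []
  | x :: rest => rest.map (fun y => (x, y)) ++ pyCombinations2 rest

-- A's helper; experiment_to_bio_replicate[exp] is (get? …).getD "": Pre_ excludes the KeyError (none) case
def create_bio_replicate_to_experiment_dict
    (experiment_to_cell_type : PySem.Dict String String)
    (experiment_to_bio_replicate : PySem.Dict String String)
    (cell_type : String) (use_experiments : Option (List String)) :
    PySem.Dict String (List String) :=
  experiment_to_cell_type.keys.foldl
    (fun d exp =>
      if (match use_experiments with
          | none => false
          | some ue => !(ue.contains exp)) then d
      else if experiment_to_cell_type.getD exp "" == cell_type then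
        d.modify ((experiment_to_bio_replicate.get? exp).getD "") [] (· ++ [exp])
      else d)
    PySem.Dict.empty

def get_positive_pairs_from_list_of_bio_replicates
    (experiment_to_cell_type : List (String × String))
    (experiment_to_bio_replicate : List (String × String))
    (cell_types : List String) (bio_replicates : List String)
    (use_experiments : Option (List String)) : List (String × String) :=
  let dct := PySem.Dict.ofList experiment_to_cell_type
  let dbr := PySem.Dict.ofList experiment_to_bio_replicate
  cell_types.foldl
    (fun positive_pairs cell_type =>
      let bio_replicate_to_experiment :=
        create_bio_replicate_to_experiment_dict dct dbr cell_type use_experiments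
      bio_replicates.foldl
        (fun positive_pairs bio_replicate =>
          positive_pairs ++ pyCombinations2 (bio_replicate_to_experiment.getD bio_replicate []))
        positive_pairs)
    []

-- ===== PORT B =====
def get_positive_pairs_from_list_of_bio_replicates_alt
    (experiment_to_cell_type : List (String × String))
    (experiment_to_bio_replicate : List (String × String))
    (cell_types : List String) (bio_replicates : List String)
    (use_experiments : Option (List String)) : List (String × String) :=
  let dct := PySem.Dict.ofList experiment_to_cell_type
  let dbr := PySem.Dict.ofList experiment_to_bio_replicate
  let wanted : PySem.Set String := PySem.Set.ofList cell_types
  let allowed : Option (PySem.Set String) := use_experiments.map PySem.Set.ofList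
  let index : PySem.Dict (String × String) (List String) :=
    dct.items.foldl
      (fun d p =>
        if wanted.contains p.2 &&
           (match allowed with | none => true | some s => s.contains p.1) then
          d.modify (p.2, (dbr.get? p.1).getD "") [] (· ++ [p.1])
        else d)
      PySem.Dict.empty
  cell_types.flatMap (fun ct => bio_replicates.flatMap (fun br => pyCombinations2 (index.getD (ct, br) [])))

-- canonical group

-- ===== PRECONDITION & SPEC =====
-- Pre_ excludes exactly the inputs where Python A raises KeyError: every experiment retained
-- by the use_experiments filter whose cell type is requested must have a real bio-replicate
-- entry, i.e. the defaulted lookup A's port performs hits an actual item of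
-- experiment_to_bio_replicate (the sentinel default is arbitrary: a key that is present yields
-- its real value, an absent key yields a pair that is no item, whatever the default).
def Pre_get_positive_pairs_from_list_of_bio_replicates (experiment_to_cell_type : List (String × String)) (experiment_to_bio_replicate : List (String × String)) (cell_types : List String) (bio_replicates : List String) (use_experiments : Option (List String)) : Prop :=
  ∀ p ∈ (PySem.Dict.ofList experiment_to_cell_type).items,
    ((match use_experiments with | none => true | some l => l.contains p.1) = true) →
    p.2 ∈ cell_types →
    (p.1, (PySem.Dict.ofList experiment_to_bio_replicate).getD p.1 "experiment-without-bio-replicate")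
      ∈ (PySem.Dict.ofList experiment_to_bio_replicate).items
instance (experiment_to_cell_type : List (String × String)) (experiment_to_bio_replicate : List (String × String)) (cell_types : List String) (bio_replicates : List String) (use_experiments : Option (List String)) : Decidable (Pre_get_positive_pairs_from_list_of_bio_replicates experiment_to_cell_type experiment_to_bio_replicate cell_types bio_replicates use_experiments) := by unfold Pre_get_positive_pairs_from_list_of_bio_replicates; infer_instance

def pvWitness_get_positive_pairs_from_list_of_bio_replicates : (List (String × String)) × (List (String × String)) × List String × List String × Option (List String) :=
  ([("e1", "c1"), ("e2", "c1")], [("e1", "r1"), ("e2", "r1")], ["c1"], ["r1"], none)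

def Spec_get_positive_pairs_from_list_of_bio_replicates (experiment_to_cell_type : List (String × String)) (experiment_to_bio_replicate : List (String × String)) (cell_types : List String) (bio_replicates : List String) (use_experiments : Option (List String)) (out : List (String × String)) : Prop := out = get_positive_pairs_from_list_of_bio_replicates_alt experiment_to_cell_type experiment_to_bio_replicate cell_types bio_replicates use_experiments
instance (experiment_to_cell_type : List (String × String)) (experiment_to_bio_replicate : List (String × String)) (cell_types : List String) (bio_replicates : List String) (use_experiments : Option (List String)) (out : List (String × String)) : Decidable (Spec_get_positive_pairs_from_list_of_bio_replicates experiment_to_cell_type experiment_to_bio_replicate cell_types bio_replicates use_experiments out) := by unfold Spec_get_positive_pairs_from_list_of_bio_replicates; infer_instance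

-- ===== CLAIM (what is proved, stated in full; the proofs are below) =====
def Claim_equal_get_positive_pairs_from_list_of_bio_replicates : Prop := ∀ (experiment_to_cell_type : List (String × String)) (experiment_to_bio_replicate : List (String × String)) (cell_types : List String) (bio_replicates : List String) (use_experiments : Option (List String)), Dom_get_positive_pairs_from_list_of_bio_replicates experiment_to_cell_type experiment_to_bio_replicate cell_types bio_replicates use_experiments → Pre_get_positive_pairs_from_list_of_bio_replicates experiment_to_cell_type experiment_to_bio_replicate cell_types bio_replicates use_experiments → Spec_get_positive_pairs_from_list_of_bio_replicates experiment_to_cell_type experiment_to_bio_replicate cell_types bio_replicates use_experiments (get_positive_pairs_from_list_of_bio_replicates experiment_to_cell_type experiment_to_bio_replicate cell_types bio_replicates use_experiments)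

-- ===== LEMMAS AND PROOFS =====

theorem foldl_if_modify_getD {kappa beta gamma : Type} [BEq kappa] [LawfulBEq kappa] [DecidableEq kappa]
    (l : List gamma) (c : gamma → Bool) (key : gamma → kappa) (val : gamma → beta) (k : kappa)
    (d : PySem.Dict kappa (List beta)) :
    (l.foldl (fun d x => if c x then d.modify (key x) [] (· ++ [val x]) else d) d).getD k []
      = d.getD k [] ++ (l.filter (fun x => c x && (key x == k))).map val := by
  induction l generalizing d with
  | nil => simp
  | cons x xs ih =>
    by_cases hc : c x = true
    · simp only [List.foldl_cons, hc, if_true, List.filter_cons, Bool.true_and]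
      rw [ih, PySem.Dict.getD_modify]
      by_cases hk : (key x == k) = true
      · have hk' : k = key x := ((beq_iff_eq).mp hk).symm
        simp [hk', List.append_assoc]
      · have hk' : ¬ k = key x := fun h => hk (by simp [h])
        simp [hk, hk']
    · simp [List.foldl_cons, hc, ih]

theorem groupA_eq (dct dbr : PySem.Dict String String) (ue : Option (List String)) (ct br : String)
    (hnd : dct.keys.Nodup) :
    (create_bio_replicate_to_experiment_dict dct dbr ct ue).getD br []
      = (dct.items.filter (fun p =>
          (((match ue with | none => true | some l => l.contains p.1) && (p.2 == ct)) &&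
            (((dbr.get? p.1).getD "") == br)))).map (fun p => p.1) := by
  unfold create_bio_replicate_to_experiment_dict
  have hbody : ∀ (acc : PySem.Dict String (List String)), ∀ x ∈ dct.keys,
      (if (match ue with | none => false | some l => !(l.contains x)) then acc
       else if dct.getD x "" == ct then acc.modify ((dbr.get? x).getD "") [] (· ++ [x]) else acc)
        = (if (((match ue with | none => true | some l => l.contains x) && (dct.getD x "" == ct)) : Bool)
            then acc.modify ((dbr.get? x).getD "") [] (· ++ [x]) else acc) := by
    intro acc x _
    cases ue with
    | none => simp
    | some l => by_cases h : x ∈ l <;> by_cases h2 : dct.getD x "" = ct <;> simp [h, h2]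
  rw [PySem.List.foldl_congr_mem _ _ _ _ hbody]
  rw [foldl_if_modify_getD]
  simp only [PySem.Dict.getD_empty, List.nil_append]
  have hkeys : dct.keys = dct.items.map (fun p => p.1) := rfl
  rw [hkeys, List.filter_map]
  simp only [List.map_map]
  have := List.filter_congr (l := dct.items)
    (p := (fun x =>
        ((match ue with | none => true | some l => l.contains x) && (dct.getD x "" == ct)) &&
          ((dbr.get? x).getD "" == br)) ∘ (fun p => p.1))
    (q := fun p =>
        ((match ue with | none => true | some l => l.contains p.1) && (p.2 == ct)) &&
          ((dbr.get? p.1).getD "" == br))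
    (by
      intro p hp
      have : dct.getD p.1 "" = p.2 :=
        PySem.Dict.getD_of_mem_items dct (by exact (Prod.mk.eta ▸ hp)) hnd ""
      simp [Function.comp, this])
  rw [this]
  rfl

theorem groupB_eq (dct dbr : PySem.Dict String String) (ue : Option (List String))
    (cell_types : List String) (ct br : String) (hct : ct ∈ cell_types) :
    (dct.items.foldl
      (fun d p =>
        if (PySem.Set.ofList cell_types).contains p.2 &&
           (match ue.map PySem.Set.ofList with | none => true | some s => s.contains p.1) then
          d.modify (p.2, (dbr.get? p.1).getD "") [] (· ++ [p.1])
        else d)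
      PySem.Dict.empty).getD (ct, br) []
      = (dct.items.filter (fun p =>
          (((match ue with | none => true | some l => l.contains p.1) && (p.2 == ct)) &&
            (((dbr.get? p.1).getD "") == br)))).map (fun p => p.1) := by
  rw [foldl_if_modify_getD]
  simp only [PySem.Dict.getD_empty, List.nil_append]
  congr 1
  apply List.filter_congr
  intro p _
  have hwct : (PySem.Set.ofList cell_types).contains ct = true := by
    simpa [List.contains_iff_mem] using (PySem.Set.mem_ofList cell_types ct).mpr hct
  by_cases h2 : p.2 = ct
  · cases ue with
    | none => simp [h2, hct, beq_iff_eq, Prod.ext_iff]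
    | some l =>
      by_cases hm : p.1 ∈ l <;>
        simp [h2, hct, hm, Prod.ext_iff]
  · have hpair : ((p.2, (dbr.get? p.1).getD "") == (ct, br)) = false :=
      beq_eq_false_iff_ne.mpr (by simp [Prod.ext_iff, h2])
    have hctb : (p.2 == ct) = false := beq_eq_false_iff_ne.mpr h2
    cases ue <;> simp [hpair, hctb]

theorem main_eq (e2ct e2br : List (String × String)) (cts brs : List String) (ue : Option (List String)) :
    get_positive_pairs_from_list_of_bio_replicates e2ct e2br cts brs ue
      = get_positive_pairs_from_list_of_bio_replicates_alt e2ct e2br cts brs ue := by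
  unfold get_positive_pairs_from_list_of_bio_replicates get_positive_pairs_from_list_of_bio_replicates_alt
  simp only [PySem.List.foldl_append_eq_flatMap, List.nil_append]
  apply List.flatMap_congr
  intro ct hct
  have hA : ∀ br, (create_bio_replicate_to_experiment_dict (PySem.Dict.ofList e2ct) (PySem.Dict.ofList e2br) ct ue).getD br []
      = ((PySem.Dict.ofList e2ct).items.foldl
          (fun d p =>
            if (PySem.Set.ofList cts).contains p.2 &&
               (match ue.map PySem.Set.ofList with | none => true | some s => s.contains p.1) then
              d.modify (p.2, ((PySem.Dict.ofList e2br).get? p.1).getD "") [] (· ++ [p.1])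
            else d)
          PySem.Dict.empty).getD (ct, br) [] := by
    intro br
    rw [groupA_eq _ _ _ _ _ (PySem.Dict.nodup_keys_ofList e2ct),
        groupB_eq _ _ _ _ _ _ hct]
  exact List.flatMap_congr fun br _ => by rw [hA br]

-- ===== VERDICT (by name: the statement is the Claim_ definition above) =====
theorem get_positive_pairs_from_list_of_bio_replicates_spec : Claim_equal_get_positive_pairs_from_list_of_bio_replicates := by
  intro e2ct e2br cts brs ue _ _
  unfold Spec_get_positive_pairs_from_list_of_bio_replicates
  exact main_eq e2ct e2br cts brs ue
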